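-- pv_equiv track=rewrite | github.com/sweetpea-org/sweetpea-py | sweetpea/tests/test_nested_block.py | has_run
-- ===== SOURCE A (Python) =====
-- def has_run(vals, target, length):
--     """
--     Return True if `vals` contains a contiguous run of `target`
--     of at least `length` occurrences.
--     """
--     run = 0
--     for v in vals:
--         name = v if isinstance(v, str) else getattr(v, "name", v)
--         run = run + 1 if name == target else 0
--         if run >= length:
--             return True
--     return False
-- ===== SOURCE B (Python) =====
-- def _runlen(xs, start, target):
--     """Length of the run of `target` in xs beginning at index `start`."""
--     k = start
--     while k < len(xs) and xs[k] == target: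
--         k += 1
--     return k - start
--
--
-- def has_run(vals, target, length):
--     """
--     Return True if `vals` contains a contiguous run of `target`
--     of at least `length` occurrences (length assumed positive).
--
--     Group-skipping scan: measure each whole run of `target` once and jump
--     past it, instead of keeping a per-element counter.
--     """
--     i, n = 0, len(vals)
--     while i < n:
--         if vals[i] == target:
--             k = 1 + _runlen(vals, i + 1, target)
--             if k >= length:
--                 return True
--             i += k  # skip the whole run
--         else:
--             i += 1
--     return False
-- ===== Notes on version B (the rewrite author's own statement) =====
-- stated objective: alternative
-- what changed: B replaces A's per-element running counter with a group-skipping scan that measures each maximal run of the target once and jumps past it; Pre_ excludes non-positive length, a degenerate corner where A's value (True iff vals is non-empty) and B's (True iff target occurs) are both defensible readings of 'contains a run of length <= 0'.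
-- outside the precondition, e.g. on has_run(['a'], 'b', 0): A returns True, B returns False; on has_run([], 'a', 0): A returns False, B returns False
import Mathlib
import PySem

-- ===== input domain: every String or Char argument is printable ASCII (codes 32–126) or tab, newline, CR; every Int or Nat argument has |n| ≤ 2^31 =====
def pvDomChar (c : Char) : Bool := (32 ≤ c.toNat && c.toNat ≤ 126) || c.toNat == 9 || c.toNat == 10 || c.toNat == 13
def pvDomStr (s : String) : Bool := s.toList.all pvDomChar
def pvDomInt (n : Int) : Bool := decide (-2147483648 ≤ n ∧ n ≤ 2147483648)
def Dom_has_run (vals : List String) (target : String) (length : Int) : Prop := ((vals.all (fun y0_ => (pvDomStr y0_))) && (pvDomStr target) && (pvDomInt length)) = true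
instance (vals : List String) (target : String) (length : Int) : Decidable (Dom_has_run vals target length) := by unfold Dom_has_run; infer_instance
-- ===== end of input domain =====

-- B replaces A's per-element running counter with a group-skipping scan over maximal runs
-- (alternative decomposition, same O(n) cost); proved equal to A for positive `length`.


-- ===== PORT A =====
-- A: running counter, reset on mismatch, early return when it reaches `length`.
def hasRunLoopA (target : String) (length : Int) : List String → Int → Bool
  | [], _ => false
  | v :: rest, run =>
    let name := v   -- v is a str, so `v if isinstance(v, str) else getattr(v, "name", v)` is v
    let run := if name = target then run + 1 else 0
    if run ≥ length then true else hasRunLoopA target length rest run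

def has_run (vals : List String) (target : String) (length : Int) : Bool :=
  hasRunLoopA target length vals 0

-- ===== PORT B =====
-- _runlen: length of the leading run of `target`
def runlenB : List String → String → Nat
  | [], _ => 0
  | x :: xs, target => if x = target then 1 + runlenB xs target else 0

-- B's while loop (the `names` comprehension is the identity on a list of str)
def hasRunLoopB (target : String) (length : Int) : List String → Bool
  | [] => false
  | v :: rest =>
    if v = target then
      let k := 1 + runlenB rest target
      if (k : Int) ≥ length then true
      else hasRunLoopB target length ((v :: rest).drop k)
    else hasRunLoopB target length rest
termination_by l => l.length
decreasing_by
  all_goals simp [List.length_drop]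

def has_run_alt (vals : List String) (target : String) (length : Int) : Bool :=
  hasRunLoopB target length vals

-- ===== PRECONDITION & SPEC =====
-- Pre_ excludes non-positive `length`, a degenerate corner where A's value (True iff
-- vals is non-empty) and B's (True iff target occurs) are equally defensible readings
-- of "contains a run of length ≤ 0"; no caller would specify either.
def Pre_has_run (vals : List String) (target : String) (length : Int) : Prop := 1 ≤ length
instance (vals : List String) (target : String) (length : Int) : Decidable (Pre_has_run vals target length) := by unfold Pre_has_run; infer_instance
def pvWitness_has_run : List String × String × Int := (["a", "b", "b"], "b", 2)
def Spec_has_run (vals : List String) (target : String) (length : Int) (out : Bool) : Prop := out = has_run_alt vals target length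
instance (vals : List String) (target : String) (length : Int) (out : Bool) : Decidable (Spec_has_run vals target length out) := by unfold Spec_has_run; infer_instance

-- ===== CLAIM (what is proved, stated in full; the proofs are below) =====
def Claim_equal_has_run : Prop := ∀ (vals : List String) (target : String) (length : Int), Dom_has_run vals target length → Pre_has_run vals target length → Spec_has_run vals target length (has_run vals target length)

-- ===== LEMMAS AND PROOFS =====

-- step equations for the two loops
theorem loopA_cons_eq (target : String) (length : Int) (v : String) (rest : List String)
    (run : Int) (hv : v = target) :
    hasRunLoopA target length (v :: rest) run =
      if run + 1 ≥ length then true else hasRunLoopA target length rest (run + 1) := by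
  simp [hasRunLoopA, hv]

theorem loopA_cons_ne (target : String) (length : Int) (v : String) (rest : List String)
    (run : Int) (hv : ¬ v = target) :
    hasRunLoopA target length (v :: rest) run =
      if (0 : Int) ≥ length then true else hasRunLoopA target length rest 0 := by
  simp [hasRunLoopA, hv]

theorem loopB_nil (target : String) (length : Int) :
    hasRunLoopB target length [] = false := by
  simp only [hasRunLoopB]

theorem loopB_cons_eq (target : String) (length : Int) (v : String) (rest : List String)
    (hv : v = target) :
    hasRunLoopB target length (v :: rest) =
      if ((1 + runlenB rest target : Nat) : Int) ≥ length then true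
      else hasRunLoopB target length ((v :: rest).drop (1 + runlenB rest target)) := by
  simp only [hasRunLoopB, if_pos hv]

theorem loopB_cons_ne (target : String) (length : Int) (v : String) (rest : List String)
    (hv : ¬ v = target) :
    hasRunLoopB target length (v :: rest) = hasRunLoopB target length rest := by
  simp only [hasRunLoopB, if_neg hv]

theorem runlen_cons_eq (target : String) (v : String) (rest : List String) (hv : v = target) :
    runlenB (v :: rest) target = 1 + runlenB rest target := by
  simp [runlenB, hv]

theorem runlen_cons_ne (target : String) (v : String) (rest : List String) (hv : ¬ v = target) :
    runlenB (v :: rest) target = 0 := by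
  simp [runlenB, hv]

-- B's loop step: measure the leading run, then continue past it
theorem loopB_skip (target : String) (length : Int) (h : 1 ≤ length) (l : List String) :
    hasRunLoopB target length l =
      (decide ((runlenB l target : Int) ≥ length) || hasRunLoopB target length (l.drop (runlenB l target))) := by
  cases l with
  | nil =>
    have hd : ¬ ((runlenB [] target : Nat) : Int) ≥ length := by simp [runlenB]; omega
    rw [List.drop_nil, loopB_nil, decide_eq_false hd, Bool.false_or]
  | cons v rest =>
    by_cases hv : v = target
    · rw [loopB_cons_eq target length v rest hv, runlen_cons_eq target v rest hv]
      by_cases h1 : ((1 + runlenB rest target : Nat) : Int) ≥ length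
      · rw [if_pos h1, decide_eq_true h1, Bool.true_or]
      · rw [if_neg h1, decide_eq_false h1, Bool.false_or]
    · rw [loopB_cons_ne target length v rest hv, runlen_cons_ne target v rest hv]
      have h0 : ¬ ((0 : Nat) : Int) ≥ length := by omega
      rw [decide_eq_false h0, Bool.false_or, List.drop_zero,
        loopB_cons_ne target length v rest hv]

-- main invariant relating A's counter scan to B's group-skipping scan
theorem loopA_eq (target : String) (length : Int) (h : 1 ≤ length) :
    ∀ (l : List String) (run : Int), 0 ≤ run → run < length →
    hasRunLoopA target length l run =
      (decide ((run + (runlenB l target : Int)) ≥ length) || hasRunLoopB target length (l.drop (runlenB l target))) := by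
  intro l
  induction l with
  | nil =>
    intro run h0 hlt
    have hd : ¬ (run + ((runlenB [] target : Nat) : Int)) ≥ length := by
      simp [runlenB]; omega
    rw [decide_eq_false hd, Bool.false_or]
    simp only [runlenB, List.drop_zero, loopB_nil]
    simp [hasRunLoopA]
  | cons v rest ih =>
    intro run h0 hlt
    by_cases hv : v = target
    · rw [loopA_cons_eq target length v rest run hv, runlen_cons_eq target v rest hv]
      have hcast : (run + ((1 + runlenB rest target : Nat) : Int)) = (run + 1) + (runlenB rest target : Int) := by
        push_cast; ring
      by_cases h1 : run + 1 ≥ length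
      · have hd : (run + ((1 + runlenB rest target : Nat) : Int)) ≥ length := by
          rw [hcast]; have := Int.natCast_nonneg (runlenB rest target); omega
        rw [if_pos h1, decide_eq_true hd, Bool.true_or]
      · have hdrop : (v :: rest).drop (1 + runlenB rest target) = rest.drop (runlenB rest target) := by
          rw [Nat.add_comm, List.drop_succ_cons]
        rw [if_neg h1, ih (run + 1) (by omega) (by omega), hcast, hdrop]
    · rw [loopA_cons_ne target length v rest run hv, runlen_cons_ne target v rest hv,
        if_neg (by omega : ¬ (0 : Int) ≥ length), ih 0 le_rfl (by omega)]
      simp only [Int.zero_add]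
      rw [← loopB_skip target length h rest]
      have hd : ¬ (run + ((0 : Nat) : Int)) ≥ length := by simp; omega
      rw [decide_eq_false hd, Bool.false_or, List.drop_zero,
        loopB_cons_ne target length v rest hv]

-- ===== VERDICT (by name: the statement is the Claim_ definition above) =====
theorem has_run_spec : Claim_equal_has_run := by
  intro vals target length _ hpre
  have h1 : (1 : Int) ≤ length := hpre
  unfold Spec_has_run has_run has_run_alt
  rw [loopA_eq target length h1 vals 0 le_rfl (by omega),
    loopB_skip target length h1 vals]
  norm_num
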